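-- pv_equiv track=rewrite | github.com/fp-computer-programming/cycle-10-labs-P22inolan | cycle-10-labs-2.py | div_less
-- ===== SOURCE A (Python) =====
-- def div_less(lst):
--     blank = []
--     for num in lst:
--         if num % 5 == 0:
--             if num <= 150:
--                 blank.append(num)
--         if num > 500:
--             break
--     return blank
-- ===== SOURCE B (Python) =====
-- def div_less(lst):
--     stop = len(lst)
--     for i, num in enumerate(lst):
--         if num > 500:
--             stop = i + 1
--             break
--     return [num for num in lst[:stop] if num % 5 == 0 and num <= 150]
-- ===== Notes on version B (the rewrite author's own statement) =====
-- stated objective: alternative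
-- what changed: Replaces the single interleaved loop with break by two sequential passes: first compute the stopping boundary (index of the first element > 500, inclusive), then filter that prefix with a comprehension.
import Mathlib
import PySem

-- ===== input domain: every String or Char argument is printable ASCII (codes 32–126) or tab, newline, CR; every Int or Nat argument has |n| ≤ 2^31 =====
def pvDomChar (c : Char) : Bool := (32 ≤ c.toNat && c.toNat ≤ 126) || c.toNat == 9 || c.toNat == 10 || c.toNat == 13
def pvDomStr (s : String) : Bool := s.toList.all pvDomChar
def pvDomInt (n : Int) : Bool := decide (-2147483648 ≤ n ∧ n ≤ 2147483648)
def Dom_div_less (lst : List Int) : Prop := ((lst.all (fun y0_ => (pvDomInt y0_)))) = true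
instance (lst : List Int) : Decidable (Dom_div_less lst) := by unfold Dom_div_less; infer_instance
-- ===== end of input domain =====

-- B replaces the interleaved loop-with-break by a boundary scan followed by a prefix filter (alternative decomposition).


-- ===== PORT A =====
def div_less.go : List Int → List Int → List Int
  | [], blank => blank
  | num :: t, blank =>
      let blank' := if PySem.Int.mod num 5 = 0 ∧ num ≤ 150 then blank ++ [num] else blank
      if num > 500 then blank' else div_less.go t blank'

def div_less (lst : List Int) : List Int := div_less.go lst []

-- ===== PORT B =====
-- boundary pass: index of first element > 500 plus one, else the length
def div_less_alt.stop : List Int → Nat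
  | [] => 0
  | num :: t => if num > 500 then 1 else 1 + div_less_alt.stop t

def div_less_alt (lst : List Int) : List Int :=
  (lst.take (div_less_alt.stop lst)).filter (fun num => decide (PySem.Int.mod num 5 = 0 ∧ num ≤ 150))

-- ===== PRECONDITION & SPEC =====
def Spec_div_less (lst : List Int) (out : List Int) : Prop := out = div_less_alt lst
instance (lst : List Int) (out : List Int) : Decidable (Spec_div_less lst out) := by unfold Spec_div_less; infer_instance

-- ===== CLAIM (what is proved, stated in full; the proofs are below) =====
def Claim_equal_div_less : Prop := ∀ (lst : List Int), Dom_div_less lst → Spec_div_less lst (div_less lst)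

-- ===== LEMMAS AND PROOFS =====

lemma div_less_mod5 (n : Int) : PySem.Int.mod n 5 = 0 ↔ 5 ∣ n := by
  simp [PySem.Int.mod, Int.fmod_eq_emod_of_nonneg]

lemma div_less_go_eq (lst : List Int) (acc : List Int) :
    div_less.go lst acc = acc ++ div_less_alt lst := by
  induction lst generalizing acc with
  | nil => simp [div_less.go, div_less_alt, div_less_alt.stop]
  | cons n t ih =>
      simp only [div_less.go, div_less_alt, div_less_alt.stop]
      by_cases hb : n > 500
      · rw [if_pos hb, if_pos hb, List.take, List.take, List.filter_cons]
        by_cases h5 : PySem.Int.mod n 5 = 0 ∧ n ≤ 150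
        · simp [h5, ((div_less_mod5 n).mp h5.1), h5.2, List.filter]
        · have hf : ¬ (5 ∣ n ∧ n ≤ 150) := fun h => h5 ⟨((div_less_mod5 n).mpr h.1), h.2⟩
          simp [h5, List.filter, ← Bool.decide_and, hf]
      · rw [if_neg hb, if_neg hb, ih]
        have htake : List.take (1 + div_less_alt.stop t) (n :: t)
            = n :: List.take (div_less_alt.stop t) t := by
          rw [Nat.add_comm]; rfl
        rw [htake, List.filter_cons]
        by_cases h5 : PySem.Int.mod n 5 = 0 ∧ n ≤ 150
        · simp [h5, ((div_less_mod5 n).mp h5.1), h5.2, div_less_alt]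
        · have hf : ¬ (5 ∣ n ∧ n ≤ 150) := fun h => h5 ⟨((div_less_mod5 n).mpr h.1), h.2⟩
          simp [h5, ← Bool.decide_and, hf, div_less_alt]

-- ===== VERDICT (by name: the statement is the Claim_ definition above) =====
theorem div_less_spec : Claim_equal_div_less := by
  intro lst _
  unfold Spec_div_less div_less
  simpa using div_less_go_eq lst []
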